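-- pv_equiv track=rewrite | github.com/jecht1014/AlgorithmPictureBook | shumi/GA/GA.py | base_sequence_table_encode
-- ===== SOURCE A (Python) =====
-- import copy
--
-- def base_sequence_table_encode(gene1, gene2):
--     c1 = [1] * len(gene1)
--     c2 = []
--     gene1_c = copy.deepcopy(gene1)
--     for s in gene2:
--         c2.append(gene1_c.index(s)+1)
--         del gene1_c[gene1_c.index(s)]
--
--     return c1, c2
-- ===== SOURCE B (Python) =====
-- def base_sequence_table_encode(gene1, gene2):
--     # Positions-based re-encoding: instead of mutating a shrinking copy of
--     # gene1, track the set of removed original positions; the rank of the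
--     # first still-active occurrence of s is its original index minus the
--     # number of removed positions before it.
--     removed = set()
--     c2 = []
--     for s in gene2:
--         p = next(i for i, v in enumerate(gene1) if v == s and i not in removed)
--         c2.append(p + 1 - sum(1 for q in removed if q < p))
--         removed.add(p)
--     return [1] * len(gene1), c2
-- ===== Notes on version B (the rewrite author's own statement) =====
-- stated objective: alternative
-- what changed: B never mutates a copy of gene1: it keeps a set of removed original positions and computes each code as the original index of the first still-active occurrence of s minus the number of removed positions before it, instead of A's index()+del on a shrinking list.
import Mathlib
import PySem

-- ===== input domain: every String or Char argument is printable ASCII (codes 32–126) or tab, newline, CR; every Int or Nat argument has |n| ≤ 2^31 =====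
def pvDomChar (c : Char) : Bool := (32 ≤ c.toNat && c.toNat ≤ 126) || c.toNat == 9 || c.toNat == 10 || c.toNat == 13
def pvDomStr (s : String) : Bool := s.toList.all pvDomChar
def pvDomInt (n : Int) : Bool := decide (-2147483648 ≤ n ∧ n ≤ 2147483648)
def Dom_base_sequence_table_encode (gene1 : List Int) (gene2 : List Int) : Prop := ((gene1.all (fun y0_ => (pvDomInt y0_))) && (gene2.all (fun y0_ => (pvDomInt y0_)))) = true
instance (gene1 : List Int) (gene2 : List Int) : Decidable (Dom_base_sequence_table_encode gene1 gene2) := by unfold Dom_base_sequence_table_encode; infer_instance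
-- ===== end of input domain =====

-- B replaces A's shrinking-copy mutation (index()+del) by a set of removed original
-- positions and direct rank arithmetic; same cost, no mutation ("alternative").

-- ===== PORT A =====
-- one loop step of A: i = gene1_c.index(s); c2.append(i+1); del gene1_c[gene1_c.index(s)]
-- (Python raises ValueError when s is absent — index? = none; excluded by Pre_, state kept)
def pvStepA (st : List Int × List Int) (s : Int) : List Int × List Int :=
  match PySem.List.index? st.1 s with
  | some i => (st.1.eraseIdx i, st.2 ++ [(i : Int) + 1])
  | none => st

def base_sequence_table_encode (gene1 : List Int) (gene2 : List Int) : List Int × List Int :=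
  let c1 := List.replicate gene1.length (1 : Int)
  let r := gene2.foldl pvStepA (gene1, ([] : List Int))
  (c1, r.2)

-- ===== PORT B =====
-- next(i for i, v in enumerate(gene1) if v == s and i not in removed)
-- (StopIteration when no such i — returns none; excluded by Pre_)
def pvFindAct (g : List Int) (removed : List Int) (s : Int) (k : Nat) : Option Nat :=
  match g with
  | [] => none
  | v :: t => if v == s && !(removed.contains ((k : Nat) : Int)) then some k
              else pvFindAct t removed s (k + 1)

-- one loop step of B: c2.append(p + 1 - sum(1 for q in removed if q < p)); removed.add(p)
def pvStepB (g : List Int) (st : List Int × List Int) (s : Int) : List Int × List Int :=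
  match pvFindAct g st.1 s 0 with
  | some p =>
      (PySem.Set.add st.1 ((p : Nat) : Int),
       st.2 ++ [(p : Int) + 1 - st.1.foldl (fun a q => if q < (p : Int) then a + 1 else a) 0])
  | none => st

def base_sequence_table_encode_alt (gene1 : List Int) (gene2 : List Int) : List Int × List Int :=
  let r := gene2.foldl (pvStepB gene1) (([] : List Int), ([] : List Int))
  (List.replicate gene1.length (1 : Int), r.2)

-- ===== PRECONDITION & SPEC =====
-- exactly the inputs where A returns: every value must occur in gene2 at most as often
-- as in gene1 (otherwise list.index raises ValueError)
def Pre_base_sequence_table_encode (gene1 : List Int) (gene2 : List Int) : Prop :=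
  ∀ v ∈ gene2, gene2.count v ≤ gene1.count v
instance (gene1 : List Int) (gene2 : List Int) : Decidable (Pre_base_sequence_table_encode gene1 gene2) := by unfold Pre_base_sequence_table_encode; infer_instance

def pvWitness_base_sequence_table_encode : List Int × List Int := ([3, 1, 2], [2, 3, 1])

def Spec_base_sequence_table_encode (gene1 : List Int) (gene2 : List Int) (out : List Int × List Int) : Prop := out = base_sequence_table_encode_alt gene1 gene2
instance (gene1 : List Int) (gene2 : List Int) (out : List Int × List Int) : Decidable (Spec_base_sequence_table_encode gene1 gene2 out) := by unfold Spec_base_sequence_table_encode; infer_instance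

-- ===== CLAIM (what is proved, stated in full; the proofs are below) =====
def Claim_equal_base_sequence_table_encode : Prop := ∀ (gene1 : List Int) (gene2 : List Int), Dom_base_sequence_table_encode gene1 gene2 → Pre_base_sequence_table_encode gene1 gene2 → Spec_base_sequence_table_encode gene1 gene2 (base_sequence_table_encode gene1 gene2)

-- ===== LEMMAS AND PROOFS =====

-- the values of gene1 at positions ≥ k that are not in `removed` (A's gene1_c, reconstructed
-- from B's state)
def pvActFrom (g : List Int) (removed : List Int) (k : Nat) : List Int :=
  match g with
  | [] => []
  | v :: t => if removed.contains ((k : Nat) : Int) then pvActFrom t removed (k + 1)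
              else v :: pvActFrom t removed (k + 1)

theorem pvActFrom_cons (v : Int) (t : List Int) (removed : List Int) (k : Nat) :
    pvActFrom (v :: t) removed k =
      if ((k : Nat) : Int) ∈ removed then pvActFrom t removed (k + 1)
      else v :: pvActFrom t removed (k + 1) := by
  simp [pvActFrom]

theorem pvActFrom_nil (g : List Int) (k : Nat) : pvActFrom g [] k = g := by
  induction g generalizing k with
  | nil => rfl
  | cons v t ih => simp [pvActFrom, ih]

theorem pvActFrom_append_lt (g : List Int) (removed : List Int) (m : Nat) :
    ∀ k : Nat, m < k → pvActFrom g (removed ++ [(m : Int)]) k = pvActFrom g removed k := by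
  induction g with
  | nil => intro k _; rfl
  | cons v t ih =>
      intro k hk
      have hne : ((k : Nat) : Int) ≠ (m : Int) := by exact_mod_cast Nat.ne_of_gt hk
      simp [pvActFrom, hne, ih (k + 1) (Nat.lt_succ_of_lt hk)]

theorem pvFindAct_cons (v : Int) (t : List Int) (removed : List Int) (s : Int) (k : Nat) :
    pvFindAct (v :: t) removed s k =
      if v = s ∧ ((k : Nat) : Int) ∉ removed then some k else pvFindAct t removed s (k + 1) := by
  simp [pvFindAct]

theorem pvFindAct_ge (g : List Int) (removed : List Int) (s : Int) :
    ∀ k p : Nat, pvFindAct g removed s k = some p → k ≤ p := by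
  induction g with
  | nil => intro k p h; simp [pvFindAct] at h
  | cons v t ih =>
      intro k p h
      rw [pvFindAct_cons] at h
      by_cases hc : v = s ∧ ((k : Nat) : Int) ∉ removed
      · rw [if_pos hc] at h
        cases h
        exact Nat.le_refl _
      · rw [if_neg hc] at h
        exact Nat.le_of_succ_le (ih (k + 1) p h)

theorem pvFindAct_not_mem (g : List Int) (removed : List Int) (s : Int) :
    ∀ k p : Nat, pvFindAct g removed s k = some p → ((p : Nat) : Int) ∉ removed := by
  induction g with
  | nil => intro k p h; simp [pvFindAct] at h
  | cons v t ih =>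
      intro k p h
      rw [pvFindAct_cons] at h
      by_cases hc : v = s ∧ ((k : Nat) : Int) ∉ removed
      · rw [if_pos hc] at h
        cases h
        exact hc.2
      · rw [if_neg hc] at h
        exact ih (k + 1) p h

theorem pvFindAct_exists (g : List Int) (removed : List Int) (s : Int) :
    ∀ k : Nat, s ∈ pvActFrom g removed k → ∃ p, pvFindAct g removed s k = some p := by
  induction g with
  | nil => intro k h; simp [pvActFrom] at h
  | cons v t ih =>
      intro k h
      rw [pvFindAct_cons]
      by_cases hc : v = s ∧ ((k : Nat) : Int) ∉ removed
      · exact ⟨k, by rw [if_pos hc]⟩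
      · rw [if_neg hc]
        apply ih
        rw [pvActFrom_cons] at h
        by_cases hm : ((k : Nat) : Int) ∈ removed
        · rwa [if_pos hm] at h
        · rw [if_neg hm] at h
          rcases List.mem_cons.mp h with h | h
          · exact absurd ⟨h.symm, hm⟩ hc
          · exact h

-- number of removed positions q with k ≤ q < p
def pvCnt (removed : List Int) (a : Int) (p : Nat) : Nat :=
  removed.countP (fun q => (a ≤ q && q < (p : Int)))

theorem pvCnt_lo (removed : List Int) (a : Int) (p : Nat) (hkp : a < ((p : Nat) : Int)) :
    pvCnt removed a p = removed.count a + pvCnt removed (a + 1) p := by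
  induction removed with
  | nil => rfl
  | cons q rs ih =>
      simp only [pvCnt, List.countP_cons, List.count_cons] at *
      rw [ih]
      split_ifs <;>
        (try simp only [Bool.and_eq_true, decide_eq_true_eq, beq_iff_eq] at *) <;> omega

-- THE CORE: relation between A's index into the active list and B's original position p
theorem pvStepCore (s : Int) (removed : List Int) (hnd : removed.Nodup) :
    ∀ (g : List Int) (k p : Nat), pvFindAct g removed s k = some p →
      ∃ j : Nat,
        PySem.List.index? (pvActFrom g removed k) s = some j ∧
        j + pvCnt removed ((k : Nat) : Int) p + k = p ∧
        pvActFrom g (removed ++ [((p : Nat) : Int)]) k = (pvActFrom g removed k).eraseIdx j := by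
  intro g
  induction g with
  | nil => intro k p h; simp [pvFindAct] at h
  | cons v t ih =>
      intro k p h
      rw [pvFindAct_cons] at h
      by_cases hc : v = s ∧ ((k : Nat) : Int) ∉ removed
      · -- found here: p = k
        rw [if_pos hc] at h
        cases h
        obtain ⟨hvs, hkm'⟩ := hc
        refine ⟨0, ?_, ?_, ?_⟩
        · subst hvs
          rw [pvActFrom_cons, if_neg hkm']
          exact PySem.List.index?_cons_self _ _
        · have : pvCnt removed ((k : Nat) : Int) k = 0 := by
            simp only [pvCnt, List.countP_eq_zero]
            intro q hq
            simp only [Bool.and_eq_true, decide_eq_true_eq, not_and]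
            intro h1 h2; omega
          omega
        · have h1 : ((k : Nat) : Int) ∈ removed ++ [((k : Nat) : Int)] := by simp
          rw [pvActFrom_cons, if_pos h1, pvActFrom_cons, if_neg hkm']
          simp [pvActFrom_append_lt t removed k (k + 1) (Nat.lt_succ_self k)]
      · rw [if_neg hc] at h
        have hkp : k + 1 ≤ p := pvFindAct_ge t removed s (k + 1) p h
        rcases ih (k + 1) p h with ⟨j', hidx, hsum, herase⟩
        by_cases hm : ((k : Nat) : Int) ∈ removed
        · -- position k removed: active list unchanged, count grows by one
          have hcount1 : removed.count ((k : Nat) : Int) = 1 :=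
            List.count_eq_one_of_mem hnd hm
          refine ⟨j', ?_, ?_, ?_⟩
          · rw [pvActFrom_cons, if_pos hm]
            exact hidx
          · have hc1 : (((k + 1 : Nat)) : Int) = ((k : Nat) : Int) + 1 := by push_cast; ring
            rw [hc1] at hsum
            have := pvCnt_lo removed ((k : Nat) : Int) p (by exact_mod_cast hkp)
            omega
          · have h1 : ((k : Nat) : Int) ∈ removed ++ [((p : Nat) : Int)] :=
              List.mem_append_left _ hm
            rw [pvActFrom_cons, if_pos h1, pvActFrom_cons, if_pos hm]
            exact herase
        · -- position k active but v ≠ s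
          have hvs : v ≠ s := by
            intro hvss; exact hc ⟨hvss, hm⟩
          have hcount0 : removed.count ((k : Nat) : Int) = 0 := by
            simpa [List.count_eq_zero] using hm
          have hkp' : ((k : Nat) : Int) ≠ ((p : Nat) : Int) := by
            intro he
            have : k = p := by exact_mod_cast he
            omega
          have h2 : ((k : Nat) : Int) ∉ removed ++ [((p : Nat) : Int)] := by
            simp [hm, hkp']
          refine ⟨j' + 1, ?_, ?_, ?_⟩
          · rw [pvActFrom_cons, if_neg hm, PySem.List.index?_cons_of_ne _ hvs, hidx]
            rfl
          · have hc1 : (((k + 1 : Nat)) : Int) = ((k : Nat) : Int) + 1 := by push_cast; ring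
            rw [hc1] at hsum
            have := pvCnt_lo removed ((k : Nat) : Int) p (by exact_mod_cast (by omega : k < p))
            omega
          · rw [pvActFrom_cons, if_neg h2, pvActFrom_cons, if_neg hm, herase]
            rfl

-- B's inline count equals pvCnt from 0 when all removed positions are nonneg
theorem pvFoldCount (removed : List Int) (p : Nat) (hnn : ∀ q ∈ removed, 0 ≤ q) :
    removed.foldl (fun a q => if q < (p : Int) then a + 1 else a) 0 =
      ((pvCnt removed (0 : Int) p : Nat) : Int) := by
  have h := PySem.List.foldl_count_if (fun q => decide (q < ((p : Nat) : Int))) removed 0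
  simp only [decide_eq_true_eq] at h
  rw [h, zero_add]
  congr 1
  simp only [pvCnt]
  apply List.countP_congr
  intro q hq
  have hq0 := hnn q hq
  simp
  omega

-- erasing the first occurrence: count bookkeeping
theorem pvEraseIdx_count (l : List Int) (s : Int) (j : Nat)
    (h : PySem.List.index? l s = some j) :
    ∀ v : Int, (l.eraseIdx j).count v = l.count v - (if v = s then 1 else 0) := by
  rw [PySem.List.index?_eq_some_iff] at h
  rcases h with ⟨pre, suf, rfl, rfl, hnot⟩
  intro v
  rw [List.eraseIdx_append_of_length_le (le_refl pre.length)]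
  simp only [Nat.sub_self, List.eraseIdx_cons_zero, List.count_append, List.count_cons]
  by_cases hv : v = s
  · subst hv; simp
  · have : (s == v) = false := by simp; exact fun h' => hv h'.symm
    simp [this, hv]

-- THE LOOP INVARIANT: A's fold over the active list tracks B's fold over removed positions
theorem pvLoopEq (g : List Int) :
    ∀ (g2 : List Int) (removed c2 : List Int),
      removed.Nodup → (∀ q ∈ removed, 0 ≤ q) →
      (∀ v ∈ g2, g2.count v ≤ (pvActFrom g removed 0).count v) →
      g2.foldl pvStepA (pvActFrom g removed 0, c2) =
        (pvActFrom g (g2.foldl (pvStepB g) (removed, c2)).1 0,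
         (g2.foldl (pvStepB g) (removed, c2)).2) := by
  intro g2
  induction g2 with
  | nil => intro removed c2 _ _ _; rfl
  | cons s rest ih =>
      intro removed c2 hnd hnn hcnt
      have hs : s ∈ pvActFrom g removed 0 := by
        have h1 := hcnt s (List.mem_cons_self ..)
        have h2 : 0 < (s :: rest).count s := by
          rw [List.count_cons_self]; omega
        exact List.count_pos_iff.mp (lt_of_lt_of_le h2 h1)
      rcases pvFindAct_exists g removed s 0 hs with ⟨p, hp⟩
      rcases pvStepCore s removed hnd g 0 p hp with ⟨j, hidx, hsum, herase⟩
      have hpnot : ((p : Nat) : Int) ∉ removed := pvFindAct_not_mem g removed s 0 p hp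
      have hpc : PySem.Set.contains removed ((p : Nat) : Int) = false := by
        simp only [PySem.Set.contains]
        simpa [List.contains_iff_mem] using hpnot
      have hadd : PySem.Set.add removed ((p : Nat) : Int) = removed ++ [((p : Nat) : Int)] := by
        unfold PySem.Set.add
        rw [hpc]
        simp
      have hval : (j : Int) + 1 =
          (p : Int) + 1 - removed.foldl (fun a q => if q < (p : Int) then a + 1 else a) 0 := by
        rw [pvFoldCount removed p hnn]
        simp only [Nat.cast_zero] at hsum
        have : j + pvCnt removed (0 : Int) p = p := by omega
        omega
      simp only [List.foldl_cons]
      have hstepA : pvStepA (pvActFrom g removed 0, c2) s =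
          ((pvActFrom g removed 0).eraseIdx j, c2 ++ [(j : Int) + 1]) := by
        unfold pvStepA
        rw [hidx]
      have hstepB : pvStepB g (removed, c2) s =
          (removed ++ [((p : Nat) : Int)], c2 ++ [(j : Int) + 1]) := by
        unfold pvStepB
        rw [hp]
        show (PySem.Set.add removed ((p : Nat) : Int),
            c2 ++ [((p : Nat) : Int) + 1 -
              removed.foldl (fun a q => if q < ((p : Nat) : Int) then a + 1 else a) 0]) = _
        rw [hadd, ← hval]
      rw [hstepA, hstepB, ← herase]
      apply ih
      · simp [List.nodup_append, hnd]
        intro a ha hea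
        exact hpnot (hea ▸ ha)
      · intro q hq
        rcases List.mem_append.mp hq with h | h
        · exact hnn q h
        · simp at h; subst h; exact Int.natCast_nonneg p
      · intro v hv
        rw [herase, pvEraseIdx_count _ s j hidx v]
        have h1 := hcnt v (List.mem_cons_of_mem _ hv)
        by_cases hvs : v = s
        · subst hvs
          rw [List.count_cons_self] at h1
          rw [if_pos rfl]
          omega
        · have hsv : (s == v) = false := by
            simp
            exact fun h' => hvs h'.symm
          rw [List.count_cons, hsv] at h1
          simp at h1
          rw [if_neg hvs]
          omega

-- ===== VERDICT (by name: the statement is the Claim_ definition above) =====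
theorem base_sequence_table_encode_spec : Claim_equal_base_sequence_table_encode := by
  intro gene1 gene2 _ hpre
  unfold Spec_base_sequence_table_encode base_sequence_table_encode base_sequence_table_encode_alt
  have hmain := pvLoopEq gene1 gene2 [] [] List.nodup_nil (by simp)
    (by intro v hv; rw [pvActFrom_nil]; exact hpre v hv)
  rw [pvActFrom_nil] at hmain
  simp only []
  rw [hmain]
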